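-- pv_equiv track=rewrite | github.com/xiaojinwhu/commitor | commitor/prompt.py | remove_conventional_commit_word
-- ===== SOURCE A (Python) =====
-- def remove_conventional_commit_word(msg):
--     words = [
--         "fix",
--         "feat",
--         "build",
--         "chore",
--         "ci",
--         "docs",
--         "style",
--         "refactor",
--         "perf",
--         "test",
--     ]
--     for word in words:
--         if msg.startswith(word + ":"):
--             return msg[len(word) + 1 :].strip()
--     return msg
-- ===== SOURCE B (Python) =====
-- def remove_conventional_commit_word(msg):
--     head, sep, tail = msg.partition(":")
--     if sep and head in {
--         "fix", "feat", "build", "chore", "ci",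
--         "docs", "style", "refactor", "perf", "test",
--     }:
--         return tail.strip()
--     return msg
-- ===== Notes on version B (the rewrite author's own statement) =====
-- stated objective: idiomatic
-- what changed: Instead of looping over the ten candidate prefixes testing startswith for each, B partitions the message at its first colon once and checks set membership of the extracted head.
import Mathlib
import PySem

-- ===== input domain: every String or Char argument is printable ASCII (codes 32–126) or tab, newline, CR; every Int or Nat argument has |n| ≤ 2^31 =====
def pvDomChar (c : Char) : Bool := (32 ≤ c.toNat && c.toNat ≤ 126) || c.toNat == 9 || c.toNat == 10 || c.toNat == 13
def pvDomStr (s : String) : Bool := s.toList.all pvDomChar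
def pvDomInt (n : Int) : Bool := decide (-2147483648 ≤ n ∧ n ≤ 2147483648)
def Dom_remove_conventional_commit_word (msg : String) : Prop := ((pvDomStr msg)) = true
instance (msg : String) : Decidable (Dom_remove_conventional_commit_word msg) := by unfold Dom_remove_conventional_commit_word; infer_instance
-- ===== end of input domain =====

-- B replaces A's loop over the ten candidate prefixes (startswith each) by one partition of the
-- message at its first colon followed by a set-membership test of the extracted head (idiomatic).

-- ===== PORT A =====
-- the 'for word in words: if msg.startswith(word + ":"): return …' loop of A
def pvLoopA (msg : String) : List String → String
  | [] => msg
  | w :: ws =>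
      if PySem.Str.startswith msg (w ++ ":") then
        PySem.Str.strip (PySem.Str.slice msg (some (PySem.Str.len w + 1)) none)
      else pvLoopA msg ws

def remove_conventional_commit_word (msg : String) : String :=
  pvLoopA msg
    ["fix", "feat", "build", "chore", "ci", "docs", "style", "refactor", "perf", "test"]

-- ===== PORT B =====
-- hand port of str.partition(":") on the char list (PySem has no partition): returns
-- (text before the first ':', text after it), or none when there is no colon (exact)
def pvPartitionColon : List Char → Option (List Char × List Char)
  | [] => none
  | c :: rest =>
      if c = ':' then some ([], rest)
      else
        match pvPartitionColon rest with
        | none => none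
        | some (h, t) => some (c :: h, t)

def remove_conventional_commit_word_alt (msg : String) : String :=
  match pvPartitionColon msg.toList with
  | none => msg
  | some (h, t) =>
      if PySem.Set.contains
          (PySem.Set.ofList
            ["fix", "feat", "build", "chore", "ci", "docs", "style", "refactor", "perf", "test"])
          (String.ofList h) then
        PySem.Str.strip (String.ofList t)
      else msg

-- ===== PRECONDITION & SPEC =====
def Spec_remove_conventional_commit_word (msg : String) (out : String) : Prop := out = remove_conventional_commit_word_alt msg
instance (msg : String) (out : String) : Decidable (Spec_remove_conventional_commit_word msg out) := by unfold Spec_remove_conventional_commit_word; infer_instance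

-- ===== CLAIM (what is proved, stated in full; the proofs are below) =====
def Claim_equal_remove_conventional_commit_word : Prop := ∀ (msg : String), Dom_remove_conventional_commit_word msg → Spec_remove_conventional_commit_word msg (remove_conventional_commit_word msg)

-- ===== LEMMAS AND PROOFS =====

lemma pvPartitionColon_none (cs : List Char) (h : pvPartitionColon cs = none) : ':' ∉ cs := by
  induction cs with
  | nil => simp
  | cons c rest ih =>
      by_cases hc : c = ':'
      · simp [pvPartitionColon, hc] at h
      · cases hr : pvPartitionColon rest with
        | none => simpa [hc, eq_comm] using fun x => ih hr x
        | some p => simp [pvPartitionColon, hc, hr] at h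

lemma pvPartitionColon_spec (cs h t : List Char) (hp : pvPartitionColon cs = some (h, t)) :
    cs = h ++ ':' :: t ∧ ':' ∉ h := by
  induction cs generalizing h t with
  | nil => simp [pvPartitionColon] at hp
  | cons c rest ih =>
      by_cases hc : c = ':'
      · subst hc; simp [pvPartitionColon] at hp
        obtain ⟨h1, h2⟩ := hp; subst h1; subst h2; simp
      · cases hr : pvPartitionColon rest with
        | none => simp [pvPartitionColon, hc, hr] at hp
        | some p =>
            obtain ⟨h', t'⟩ := p
            simp [pvPartitionColon, hc, hr] at hp
            obtain ⟨h1, h2⟩ := hp; subst h1; subst h2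
            obtain ⟨e, hnh⟩ := ih h' t' hr
            subst e
            refine ⟨rfl, fun hmem => ?_⟩
            rcases List.mem_cons.1 hmem with e | hm
            · exact hc e.symm
            · exact hnh hm

lemma pvSplit_unique (h t w r : List Char) (hh : ':' ∉ h) (hw : ':' ∉ w)
    (e : h ++ ':' :: t = w ++ ':' :: r) : h = w ∧ t = r := by
  induction h generalizing w with
  | nil =>
      cases w with
      | nil => simpa using e
      | cons d w' =>
          simp at e
          exact absurd (e.1 ▸ List.mem_cons_self) hw
  | cons c h' ih =>
      cases w with
      | nil =>
          simp at e
          exact absurd (e.1 ▸ List.mem_cons_self) hh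
      | cons d w' =>
          simp at e
          obtain ⟨e1, e2⟩ := e
          have := ih w' (fun x => hh (List.mem_cons_of_mem _ x))
            (fun x => hw (List.mem_cons_of_mem _ x)) e2
          exact ⟨by simp [e1, this.1], this.2⟩

lemma pvSw_none (msg : String) (hnc : ':' ∉ msg.toList) (p : List Char) :
    PySem.Chars.startswith msg.toList (p ++ [':']) = false := by
  cases hb : PySem.Chars.startswith msg.toList (p ++ [':']) with
  | false => rfl
  | true =>
      rw [PySem.Chars.startswith_iff] at hb
      exact absurd (hb.mem (by simp)) hnc

lemma pvLoopA_none (msg : String) (hnc : ':' ∉ msg.toList) (ws : List String) :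
    pvLoopA msg ws = msg := by
  induction ws with
  | nil => rfl
  | cons w ws ih => simp [pvLoopA, pvSw_none msg hnc, ih]

lemma pvSw_some (msg : String) (h t : List Char)
    (hp : pvPartitionColon msg.toList = some (h, t)) (w : String) (hw : ':' ∉ w.toList) :
    PySem.Str.startswith msg (w ++ ":") = true ↔ h = w.toList := by
  obtain ⟨hcs, hh⟩ := pvPartitionColon_spec _ _ _ hp
  rw [PySem.Str.startswith_eq, PySem.Chars.startswith_iff]
  constructor
  · rintro ⟨r, hr⟩
    rw [hcs] at hr
    have e : w.toList ++ ':' :: r = h ++ ':' :: t := by simpa using hr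
    exact (pvSplit_unique _ _ _ _ hw hh e).1.symm
  · intro e
    exact ⟨t, by simp [hcs, e]⟩

lemma pvVal_some (msg : String) (h t : List Char)
    (hp : pvPartitionColon msg.toList = some (h, t)) (w : String) (he : h = w.toList) :
    PySem.Str.strip (PySem.Str.slice msg (some (PySem.Str.len w + 1)) none)
      = PySem.Str.strip (String.ofList t) := by
  obtain ⟨hcs, _⟩ := pvPartitionColon_spec _ _ _ hp
  apply String.toList_injective
  rw [PySem.Str.toList_strip, PySem.Str.toList_strip, String.toList_ofList,
    PySem.Str.toList_slice]
  congr 1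
  have hlen : PySem.Str.len w + 1 = ((w.toList.length + 1 : Nat) : Int) := by
    simp [PySem.Str.len]
  show PySem.List.slice msg.toList (some (PySem.Str.len w + 1)) none = t
  rw [hlen, PySem.List.slice_from_natCast, hcs, he]
  have hsplit : w.toList ++ ':' :: t = (w.toList ++ [':']) ++ t := by simp
  rw [hsplit]
  simpa using List.drop_left (l₁ := w.toList ++ [':']) (l₂ := t)

lemma pvLoopA_some (msg : String) (h t : List Char)
    (hp : pvPartitionColon msg.toList = some (h, t)) (ws : List String)
    (hws : ∀ w ∈ ws, ':' ∉ w.toList) :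
    pvLoopA msg ws =
      if ∃ w ∈ ws, h = w.toList then PySem.Str.strip (String.ofList t) else msg := by
  induction ws with
  | nil => simp [pvLoopA]
  | cons w ws ih =>
      have hw : ':' ∉ w.toList := hws w List.mem_cons_self
      by_cases he : h = w.toList
      · rw [pvLoopA, if_pos ((pvSw_some msg h t hp w hw).2 he),
          pvVal_some msg h t hp w he, if_pos ⟨w, List.mem_cons_self, he⟩]
      · rw [pvLoopA, if_neg (fun hb => he ((pvSw_some msg h t hp w hw).1 hb)),
          ih (fun x hx => hws x (List.mem_cons_of_mem _ hx))]
        by_cases hc2 : ∃ u ∈ ws, h = u.toList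
        · obtain ⟨u, hu, e⟩ := hc2
          rw [if_pos ⟨u, hu, e⟩, if_pos ⟨u, List.mem_cons_of_mem _ hu, e⟩]
        · rw [if_neg hc2, if_neg (by
            rintro ⟨u, hu, e⟩
            rcases List.mem_cons.1 hu with rfl | hu'
            · exact he e
            · exact hc2 ⟨u, hu', e⟩)]

-- ===== VERDICT (by name: the statement is the Claim_ definition above) =====
theorem remove_conventional_commit_word_spec : Claim_equal_remove_conventional_commit_word := by
  intro msg _
  unfold Spec_remove_conventional_commit_word remove_conventional_commit_word
    remove_conventional_commit_word_alt
  cases hp : pvPartitionColon msg.toList with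
  | none => rw [pvLoopA_none msg (pvPartitionColon_none _ hp)]
  | some p =>
      obtain ⟨h, t⟩ := p
      dsimp only
      rw [pvLoopA_some msg h t hp _ (by decide)]
      have hofnodup :
          PySem.Set.ofList
            ["fix", "feat", "build", "chore", "ci", "docs", "style", "refactor", "perf", "test"]
          = ["fix", "feat", "build", "chore", "ci", "docs", "style", "refactor", "perf", "test"] :=
        PySem.Set.ofList_eq_self_of_nodup _ (by decide)
      rw [hofnodup]
      have hcond : (∃ w ∈ (["fix", "feat", "build", "chore", "ci", "docs", "style",
          "refactor", "perf", "test"] : List String), h = w.toList) ↔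
          PySem.Set.contains (["fix", "feat", "build", "chore", "ci", "docs", "style",
            "refactor", "perf", "test"] : List String) (String.ofList h) = true := by
        rw [show ∀ s : List String, ∀ x, PySem.Set.contains s x = true ↔ x ∈ s from
          fun s x => by simp [PySem.Set.contains]]
        constructor
        · rintro ⟨w, hw, rfl⟩
          simpa [show String.ofList w.toList = w from String.toList_injective (by simp)] using hw
        · intro hm
          exact ⟨String.ofList h, hm, by simp⟩
      by_cases hc : ∃ w ∈ (["fix", "feat", "build", "chore", "ci", "docs", "style",
          "refactor", "perf", "test"] : List String), h = w.toList
      · rw [if_pos hc, if_pos (hcond.1 hc)]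
      · rw [if_neg hc, if_neg (fun hb => hc (hcond.2 hb))]
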